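-- pv_equiv track=rewrite | github.com/jbudis/snakelines | rules/classification/read_based/fast_virome_explorer/create_tpm_for_krona.py | create_working_accessories
-- ===== SOURCE A (Python) =====
-- def create_working_accessories(input_file):
--     working_dir = list()
--     working_file = list()
--     no = input_file.count('/')
--
--     for i in input_file:
--
--         if i == '/':
--             no -= 1
--
--         if no != 0:
--             working_dir.append(i)
--             working_file.append(i)
--
--         if no == 0:
--             working_file.append(i)
--
--     working_dir = ''.join(working_dir)
--     working_file = ''.join(working_file)
--
--     return working_dir, working_file
-- ===== SOURCE B (Python) =====
-- def create_working_accessories(input_file):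
--     # directory = everything before the last '/' ('' when no slash); file = whole input
--     return input_file.rpartition('/')[0], input_file
-- ===== Notes on version B (the rewrite author's own statement) =====
-- stated objective: simpler
-- what changed: Replaced the character-by-character loop with a slash countdown and two accumulator lists by a single rpartition call: the second component is the unchanged input and the first is everything before the last '/'.
import Mathlib
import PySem

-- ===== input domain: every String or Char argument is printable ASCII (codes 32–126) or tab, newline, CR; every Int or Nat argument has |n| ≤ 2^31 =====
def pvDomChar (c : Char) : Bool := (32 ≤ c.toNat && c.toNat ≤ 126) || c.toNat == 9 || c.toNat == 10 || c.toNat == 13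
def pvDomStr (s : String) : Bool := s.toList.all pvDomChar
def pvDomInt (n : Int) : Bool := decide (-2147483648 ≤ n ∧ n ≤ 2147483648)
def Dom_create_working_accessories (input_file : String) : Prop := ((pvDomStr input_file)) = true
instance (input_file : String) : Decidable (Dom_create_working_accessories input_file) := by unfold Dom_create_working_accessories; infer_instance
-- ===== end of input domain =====

-- B replaces A's char-by-char loop (slash countdown, two accumulator lists) by one
-- rpartition('/') call: second component is the input unchanged, first is everything
-- before the last '/'. Objective: simpler.

-- ===== PORT A =====
-- one loop step: decrement no on '/', then the two ifs of A's body, in order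
def cwaStep (st : Int × List Char × List Char) (i : Char) : Int × List Char × List Char :=
  let no := if i = '/' then st.1 - 1 else st.1
  let dir := if no ≠ 0 then st.2.1 ++ [i] else st.2.1
  let file := if no ≠ 0 then st.2.2 ++ [i] else st.2.2
  let file := if no = 0 then file ++ [i] else file
  (no, dir, file)

def create_working_accessories (input_file : String) : String × String :=
  let no : Int := (PySem.Str.count input_file "/" : Nat)
  let st := input_file.toList.foldl cwaStep (no, [], [])
  (String.ofList st.2.1, String.ofList st.2.2)

-- ===== PORT B =====
-- input_file.rpartition('/')[0], ported exactly: drop the reversed string's suffix up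
-- to and including the last '/' ('' when no slash exists)
def create_working_accessories_alt (input_file : String) : String × String :=
  (String.ofList ((input_file.toList.reverse.dropWhile (· ≠ '/')).tail.reverse), input_file)

-- ===== PRECONDITION & SPEC =====
def Spec_create_working_accessories (input_file : String) (out : String × String) : Prop := out = create_working_accessories_alt input_file
instance (input_file : String) (out : String × String) : Decidable (Spec_create_working_accessories input_file out) := by unfold Spec_create_working_accessories; infer_instance

-- ===== CLAIM (what is proved, stated in full; the proofs are below) =====
def Claim_equal_create_working_accessories : Prop := ∀ (input_file : String), Dom_create_working_accessories input_file → Spec_create_working_accessories input_file (create_working_accessories input_file)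

-- ===== LEMMAS AND PROOFS =====

-- everything strictly before the last '/' of cs ([] when cs has no '/'), front-to-back
def dirOf (cs : List Char) : List Char :=
  match cs with
  | [] => []
  | c :: t => if '/' ∈ t then c :: dirOf t else []

theorem dirOf_of_not_mem (cs : List Char) (h : '/' ∉ cs) : dirOf cs = [] := by
  cases cs with
  | nil => rfl
  | cons c t => simp only [dirOf, if_neg (fun ht => h (List.mem_cons_of_mem c ht))]

-- PySem.Chars.count for the one-char pattern "/" is List.count
theorem count_go_slash (cs : List Char) : ∀ (fuel acc : Nat), cs.length ≤ fuel →
    PySem.Chars.count.go ['/'] fuel cs acc = acc + cs.count '/' := by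
  induction cs with
  | nil => intro fuel acc _; cases fuel <;> simp [PySem.Chars.count.go]
  | cons c t ih =>
    intro fuel acc h
    cases fuel with
    | zero => simp at h
    | succ n =>
      simp only [List.length_cons, Nat.add_one_le_add_one_iff] at h
      by_cases hc : c = '/'
      · subst hc
        simp [PySem.Chars.count.go, List.isPrefixOf, ih n (acc + 1) h]
        omega
      · simp [PySem.Chars.count.go, List.isPrefixOf, hc, ih n acc h, Ne.symm hc]

theorem chars_count_slash (cs : List Char) : PySem.Chars.count cs ['/'] = cs.count '/' := by
  simp [PySem.Chars.count, count_go_slash cs cs.length 0 le_rfl]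

-- one step of A's loop, entered with no = slashes remaining in c :: t
theorem step_eq (c : Char) (t d f : List Char) :
    cwaStep (((c :: t).count '/' : Int), d, f) c
      = ((t.count '/' : Int), (if '/' ∈ t then d ++ [c] else d), f ++ [c]) := by
  have hno : (if c = '/' then (((c :: t).count '/' : Int)) - 1 else ((c :: t).count '/' : Int))
      = (t.count '/' : Int) := by
    by_cases hc : c = '/'
    · simp only [hc, List.count_cons_self]
      push_cast; ring
    · rw [if_neg hc, List.count_cons_of_ne hc]
  by_cases ht : '/' ∈ t
  · simp [cwaStep, hno, ht, List.count_eq_zero]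
  · have h0 : ((t.count '/' : Int)) = 0 := by
      simp [List.count_eq_zero.mpr ht]
    simp [cwaStep, hno, h0, ht]

-- A's loop, started with no = number of '/' in cs, splits as dirOf / identity
theorem loop_spec (cs : List Char) : ∀ (d f : List Char),
    cs.foldl cwaStep ((cs.count '/' : Int), d, f) = (0, d ++ dirOf cs, f ++ cs) := by
  induction cs with
  | nil => intro d f; simp [dirOf]
  | cons c t ih =>
    intro d f
    rw [List.foldl_cons, step_eq, ih]
    by_cases ht : '/' ∈ t
    · simp [dirOf, ht]
    · simp [dirOf, ht, dirOf_of_not_mem t ht]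

-- B's reversed dropWhile computes dirOf
theorem dirOf_eq_rev (cs : List Char) :
    (cs.reverse.dropWhile (· ≠ '/')).tail.reverse = dirOf cs := by
  induction cs with
  | nil => simp [dirOf]
  | cons c t ih =>
    simp only [List.reverse_cons, List.dropWhile_append, dirOf]
    by_cases ht : '/' ∈ t
    · have hne : t.reverse.dropWhile (· ≠ '/') ≠ [] := by
        intro h
        have := List.dropWhile_eq_nil_iff.mp h '/' (by simpa using ht)
        simp at this
      rw [if_neg (by simpa [List.isEmpty_iff] using hne)]
      obtain ⟨x, rest, hx⟩ := List.exists_cons_of_ne_nil hne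
      rw [hx]
      simp only [List.cons_append, List.tail_cons, List.reverse_append,
        List.reverse_cons, List.reverse_nil, List.nil_append]
      rw [if_pos ht, ← ih, hx]
      simp
    · have hnil : t.reverse.dropWhile (· ≠ '/') = [] := by
        rw [List.dropWhile_eq_nil_iff]
        intro x hx
        simp only [List.mem_reverse] at hx
        simp only [decide_eq_true_eq]
        intro h; exact ht (h ▸ hx)
      rw [hnil]
      simp only [List.isEmpty_nil, if_neg ht]
      by_cases hc : c = '/' <;> simp [hc, List.dropWhile]

-- ===== VERDICT (by name: the statement is the Claim_ definition above) =====
theorem create_working_accessories_spec : Claim_equal_create_working_accessories := by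
  intro s _
  unfold Spec_create_working_accessories create_working_accessories create_working_accessories_alt
  simp only [PySem.Str.count_eq]
  have hc : PySem.Chars.count s.toList "/".toList = s.toList.count '/' := by
    rw [show "/".toList = ['/'] from rfl, chars_count_slash]
  rw [hc, loop_spec s.toList [] [], Prod.mk.injEq]
  constructor
  · rw [List.nil_append, ← dirOf_eq_rev]
  · simp [String.ofList]
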